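-- pv_equiv track=rewrite | github.com/Brian08052/FYP | cgi-bin/DB.py | clearRecurrence
-- ===== SOURCE A (Python) =====
-- def clearRecurrence(sample):
--     #We're not interested in the cases where the cancer comes back.
--     #If the number gets low enoguh, everything that comes after is set to zero.
--
--     #if the sample gets low enough, everything after is set to zero.
--     #this is to learn the general sequence of decay without reoccurance
--     flag = False
--     for i in range(len(sample)):
--         if flag == True:
--             sample[i] = 0
--         if sample[i] != None and sample[i] <= 3:
--             flag = True
--
--     return sample
-- ===== SOURCE B (Python) =====
-- def clearRecurrence(sample):
--     # find the index of the first value that is not None and <= 3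
--     cut = None
--     for i, v in enumerate(sample):
--         if v != None and v <= 3:
--             cut = i
--             break
--     # zero everything strictly after it
--     if cut is not None:
--         for j in range(cut + 1, len(sample)):
--             sample[j] = 0
--     return sample
-- ===== Notes on version B (the rewrite author's own statement) =====
-- stated objective: faster
-- what changed: Replaces A's single flag-carrying pass (which re-tests every already-zeroed cell against the threshold) by two phases: a break-out scan locating the first element <= 3, then a plain zeroing loop over the suffix after it.
import Mathlib
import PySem

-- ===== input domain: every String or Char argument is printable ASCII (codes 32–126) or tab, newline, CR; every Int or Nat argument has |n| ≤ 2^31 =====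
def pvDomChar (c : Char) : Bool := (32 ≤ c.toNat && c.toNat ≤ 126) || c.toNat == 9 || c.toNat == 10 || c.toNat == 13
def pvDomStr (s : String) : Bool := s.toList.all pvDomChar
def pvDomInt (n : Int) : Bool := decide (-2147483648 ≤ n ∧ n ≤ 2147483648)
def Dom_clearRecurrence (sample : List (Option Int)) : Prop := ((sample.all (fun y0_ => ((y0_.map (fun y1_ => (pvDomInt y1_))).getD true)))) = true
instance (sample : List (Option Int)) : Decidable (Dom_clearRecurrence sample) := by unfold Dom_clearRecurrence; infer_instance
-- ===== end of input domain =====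

-- B replaces A's flag-carrying single pass by a break-out scan for the first value <= 3
-- followed by a plain zeroing of the suffix after it (alternative decomposition; return-value
-- equivalence only — both Pythons mutate the argument in place identically).


-- ===== PORT A =====
-- A's loop, step for step: each cell is first overwritten with 0 if the flag is set,
-- then the (possibly updated) cell is tested `!= None and <= 3` to update the flag.
def clearRecurrenceGo (flag : Bool) : List (Option Int) → List (Option Int)
  | [] => []
  | x :: xs =>
    let x' := if flag then some 0 else x
    let flag' := if (match x' with | none => false | some v => decide (v ≤ 3)) then true else flag
    x' :: clearRecurrenceGo flag' xs

def clearRecurrence (sample : List (Option Int)) : List (Option Int) :=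
  clearRecurrenceGo false sample

-- ===== PORT B =====
-- B's first loop: scan with break, returning the index of the first v != None with v <= 3.
def findCut : List (Option Int) → Option Nat
  | [] => none
  | x :: xs =>
    if (match x with | none => false | some v => decide (v ≤ 3)) then some 0
    else (findCut xs).map (· + 1)

-- B's second loop writes 0 at every index j in range(cut+1, len): the result is the
-- prefix up to cut kept and the suffix after it replaced by zeros.
def clearRecurrence_alt (sample : List (Option Int)) : List (Option Int) :=
  match findCut sample with
  | none => sample
  | some cut => sample.take (cut + 1) ++ List.replicate (sample.length - (cut + 1)) (some 0)

-- ===== PRECONDITION & SPEC =====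
def Spec_clearRecurrence (sample : List (Option Int)) (out : List (Option Int)) : Prop := out = clearRecurrence_alt sample
instance (sample : List (Option Int)) (out : List (Option Int)) : Decidable (Spec_clearRecurrence sample out) := by unfold Spec_clearRecurrence; infer_instance

-- ===== CLAIM (what is proved, stated in full; the proofs are below) =====
def Claim_equal_clearRecurrence : Prop := ∀ (sample : List (Option Int)), Dom_clearRecurrence sample → Spec_clearRecurrence sample (clearRecurrence sample)

-- ===== LEMMAS AND PROOFS =====
-- Once A's flag is set, every remaining cell becomes 0 (the written 0 re-satisfies the test).
theorem clearRecurrenceGo_true (xs : List (Option Int)) :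
    clearRecurrenceGo true xs = List.replicate xs.length (some 0) := by
  induction xs with
  | nil => rfl
  | cons x xs ih => simp [clearRecurrenceGo, ih, List.replicate]

theorem clearRecurrenceGo_false_eq (xs : List (Option Int)) :
    clearRecurrenceGo false xs = clearRecurrence_alt xs := by
  induction xs with
  | nil => rfl
  | cons x xs ih =>
    by_cases h : (match x with | none => false | some v => decide (v ≤ 3)) = true
    · simp [clearRecurrenceGo, clearRecurrence_alt, findCut, h, clearRecurrenceGo_true]
    · rw [clearRecurrence_alt] at ih
      simp only [clearRecurrenceGo, clearRecurrence_alt, findCut, h, Bool.false_eq_true,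
        if_false]
      cases hc : findCut xs with
      | none => simpa [hc] using ih
      | some c =>
        simp only [hc, Option.map_some] at ih ⊢
        simp [ih, List.take_succ_cons]

-- ===== VERDICT (by name: the statement is the Claim_ definition above) =====
theorem clearRecurrence_spec : Claim_equal_clearRecurrence := by
  intro sample _
  unfold Spec_clearRecurrence clearRecurrence
  exact clearRecurrenceGo_false_eq sample
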